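-- pv_equiv track=rewrite | github.com/ZhangNANPy/NowCoderPractice | test.py | array_num
-- ===== SOURCE A (Python) =====
-- def array_num(l, r):
--     count = 0
--     num = 0
--     for i in range(l):
--         num = num + sum([int(j) for j in str(i)])
--     for i in range(l, r + 1):
--         num = num + sum([int(j) for j in str(i)])
--         if num % 3 == 0:
--             count = count + 1
--     return count
-- ===== SOURCE B (Python) =====
-- def array_num(l, r):
--     # Closed form: digit-sum(i) = i (mod 3), so the running total after i is
--     # 0+1+...+i = i(i+1)/2 (mod 3), which is divisible by 3 exactly when i % 3 != 1.
--     # Count i in [l, r] with i % 3 != 1 by floor-division arithmetic, O(1).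
--     if r < l:
--         return 0
--     return (r - l + 1) - ((r + 2) // 3 - (l + 1) // 3)
-- ===== Notes on version B (the rewrite author's own statement) =====
-- stated objective: faster
-- what changed: Replaced the two digit-summing loops with an O(1) closed form: the cumulative digit sum after i is congruent to i(i+1)/2 mod 3, so the answer is the count of i in [l,r] with i % 3 != 1, computed with two floor divisions.
import Mathlib
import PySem

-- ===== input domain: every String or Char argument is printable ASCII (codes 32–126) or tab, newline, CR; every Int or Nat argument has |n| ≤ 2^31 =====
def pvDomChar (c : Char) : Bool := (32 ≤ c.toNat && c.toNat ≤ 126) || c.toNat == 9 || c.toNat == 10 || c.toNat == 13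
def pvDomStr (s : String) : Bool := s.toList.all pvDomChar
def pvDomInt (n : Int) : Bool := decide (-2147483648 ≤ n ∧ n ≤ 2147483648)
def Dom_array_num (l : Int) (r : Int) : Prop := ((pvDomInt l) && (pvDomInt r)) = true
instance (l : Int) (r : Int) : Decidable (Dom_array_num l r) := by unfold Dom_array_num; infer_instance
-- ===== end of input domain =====

-- B replaces A's two digit-summing loops with an O(1) closed form (count of i in [l,r] with i % 3 ≠ 1); objective: faster.

-- ===== PORT A =====
-- int(j) for a single character j of str(i); the .getD 0 default is unreachable under
-- Pre_array_num (only the '-' of a negative i would make ofChars? return none = ValueError)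
def chVal (c : Char) : Int := (PySem.Int.ofChars? [c]).getD 0

-- sum([int(j) for j in str(i)])
def dsA (i : Int) : Int := (((PySem.Int.toStr i).toList).map chVal).sum

-- the body of A's second loop, state = (count, num)
def stepA (st : Int × Int) (i : Int) : Int × Int :=
  let num := st.2 + dsA i
  (if PySem.Int.mod num 3 == 0 then st.1 + 1 else st.1, num)

def array_num (l : Int) (r : Int) : Int :=
  let num := (PySem.List.pyRange 0 l 1).foldl (fun num i => num + dsA i) 0
  ((PySem.List.pyRange l (r + 1) 1).foldl stepA (0, num)).1

-- ===== PORT B =====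
def array_num_alt (l : Int) (r : Int) : Int :=
  if r < l then 0
  else (r - l + 1) - (PySem.Int.floordiv (r + 2) 3 - PySem.Int.floordiv (l + 1) 3)

-- ===== PRECONDITION & SPEC =====
-- Pre_ excludes exactly the inputs where A raises ValueError: l < 0 with a non-empty
-- second loop makes A call int('-') on the sign character of a negative i.
def Pre_array_num (l : Int) (r : Int) : Prop := 0 ≤ l ∨ r < l
instance (l : Int) (r : Int) : Decidable (Pre_array_num l r) := by unfold Pre_array_num; infer_instance
def pvWitness_array_num : Int × Int := (2, 10)

def Spec_array_num (l : Int) (r : Int) (out : Int) : Prop := out = array_num_alt l r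
instance (l : Int) (r : Int) (out : Int) : Decidable (Spec_array_num l r out) := by unfold Spec_array_num; infer_instance

-- ===== CLAIM (what is proved, stated in full; the proofs are below) =====
def Claim_equal_array_num : Prop := ∀ (l : Int) (r : Int), Dom_array_num l r → Pre_array_num l r → Spec_array_num l r (array_num l r)

-- ===== LEMMAS AND PROOFS =====

-- A's first loop as a function of its bound: num after summing digit sums of 0..n-1
def TA (n : Int) : Int := (PySem.List.pyRange 0 n 1).foldl (fun num i => num + dsA i) 0

lemma chVal_digitChar {d : Nat} (hd : d < 10) : chVal (Nat.digitChar d) = (d : Int) := by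
  interval_cases d <;> decide

lemma toDigitsCore_sum (f : Nat) : ∀ (n : Nat) (acc : List Char), n < f →
    (3 : Int) ∣ (((Nat.toDigitsCore 10 f n acc).map chVal).sum - ((n : Int) + (acc.map chVal).sum)) := by
  induction f with
  | zero => intro n acc h; omega
  | succ f ih =>
    intro n acc h
    rw [Nat.toDigitsCore]
    by_cases h0 : n / 10 = 0
    · have hn : n < 10 := Nat.lt_of_div_eq_zero (by norm_num) h0
      simp only [h0, if_true, List.map_cons, List.sum_cons,
        chVal_digitChar (Nat.mod_lt n (by norm_num))]
      have : n % 10 = n := Nat.mod_eq_of_lt hn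
      rw [this]
      simp
    · simp only [h0, if_false]
      have hlt : n / 10 < f := by
        have hn0 : n ≠ 0 := by intro hc; subst hc; simp at h0
        have : n / 10 < n := Nat.div_lt_self (Nat.pos_of_ne_zero hn0) (by norm_num)
        omega
      have hih := ih (n / 10) (Nat.digitChar (n % 10) :: acc) hlt
      simp only [List.map_cons, List.sum_cons,
        chVal_digitChar (Nat.mod_lt n (by norm_num))] at hih
      have hnd : n = 10 * (n / 10) + n % 10 := (Nat.div_add_mod n 10).symm
      obtain ⟨k, hk⟩ := hih
      refine ⟨k - 3 * ((n : Int) / 10), ?_⟩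
      have hcast : (n : Int) = 10 * ((n : Int) / 10) + (n : Int) % 10 := by omega
      have h1 : ((n / 10 : Nat) : Int) = (n : Int) / 10 := by omega
      have h2 : ((n % 10 : Nat) : Int) = (n : Int) % 10 := by omega
      rw [h1, h2] at hk
      linarith [hk]

lemma dsA_nat (n : Nat) : (3 : Int) ∣ (dsA (n : Int) - n) := by
  have h := toDigitsCore_sum (n + 1) n [] (Nat.lt_succ_self n)
  simp only [List.map_nil, List.sum_nil, add_zero] at h
  unfold dsA
  rw [PySem.Int.toList_toStr]
  unfold PySem.Int.toChars
  have hneg : ¬ ((n : Int) < 0) := by omega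
  rw [if_neg hneg]
  have : ((n : Int)).toNat = n := Int.toNat_natCast n
  rw [this]
  exact h

lemma dsA_mod (b : Int) (hb : 0 ≤ b) : (3 : Int) ∣ (dsA b - b) := by
  have := dsA_nat b.toNat
  rwa [Int.toNat_of_nonneg hb] at this

lemma TA_succ (b : Int) (hb : 0 ≤ b) : TA (b + 1) = TA b + dsA b := by
  unfold TA
  rw [PySem.List.pyRange_one_succ_right hb, List.foldl_append]
  simp

lemma TA_triangle (n : Int) (hn : 0 ≤ n) : (3 : Int) ∣ (2 * TA n - n * (n - 1)) := by
  induction n, hn using Int.le_induction with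
  | base =>
      unfold TA
      rw [PySem.List.pyRange_one_eq_nil (by omega)]
      simp
  | succ n hn ih =>
      have h2 := dsA_mod n hn
      have heq : 2 * TA (n + 1) - (n + 1) * (n + 1 - 1)
          = (2 * TA n - n * (n - 1)) + 2 * (dsA n - n) := by
        rw [TA_succ n hn]; ring
      rw [heq]
      exact dvd_add ih (Dvd.dvd.mul_left h2 2)

-- residue of the running total: TA (b+1) % 3 = 0 ↔ b % 3 ≠ 1
lemma TA_succ_mod (b : Int) (hb : 0 ≤ b) :
    TA (b + 1) % 3 = if b % 3 = 1 then 1 else 0 := by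
  obtain ⟨k, hk⟩ := TA_triangle (b + 1) (by omega)
  have h3 : b % 3 = 0 ∨ b % 3 = 1 ∨ b % 3 = 2 := by omega
  rcases h3 with h | h | h
  · obtain ⟨q, hq⟩ : ∃ q, b = 3 * q := ⟨b / 3, by omega⟩
    have hp : (b + 1) * (b + 1 - 1) = 0 + 3 * (3 * (q * q) + q) := by subst hq; ring
    rw [hp] at hk
    rw [if_neg (by omega)]
    generalize 3 * (q * q) + q = m at hk
    omega
  · obtain ⟨q, hq⟩ : ∃ q, b = 3 * q + 1 := ⟨b / 3, by omega⟩
    have hp : (b + 1) * (b + 1 - 1) = 2 + 3 * (3 * (q * q) + 3 * q) := by subst hq; ring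
    rw [hp] at hk
    rw [if_pos h]
    generalize 3 * (q * q) + 3 * q = m at hk
    omega
  · obtain ⟨q, hq⟩ : ∃ q, b = 3 * q + 2 := ⟨b / 3, by omega⟩
    have hp : (b + 1) * (b + 1 - 1) = 0 + 3 * (3 * (q * q) + 5 * q + 2) := by subst hq; ring
    rw [hp] at hk
    rw [if_neg (by omega)]
    generalize 3 * (q * q) + 5 * q + 2 = m at hk
    omega

-- invariant of A's second loop
lemma loop_inv (l : Int) (hl : 0 ≤ l) (b : Int) (hb : l ≤ b) :
    (PySem.List.pyRange l b 1).foldl stepA (0, TA l)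
      = ((b - l) - ((b + 1) / 3 - (l + 1) / 3), TA b) := by
  induction b, hb using Int.le_induction with
  | base =>
      have hnil : PySem.List.pyRange l l 1 = [] := PySem.List.pyRange_one_eq_nil (le_refl l)
      rw [hnil]
      simp only [List.foldl_nil]
      rw [show (l - l) - ((l + 1) / 3 - (l + 1) / 3) = 0 from by omega]
  | succ b hlb ih =>
      rw [PySem.List.pyRange_one_succ_right hlb, List.foldl_append, ih]
      have hb0 : (0 : Int) ≤ b := le_trans hl hlb
      unfold stepA
      simp only [List.foldl_cons, List.foldl_nil]
      rw [← TA_succ b hb0]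
      have hmod := TA_succ_mod b hb0
      rw [PySem.Int.mod_eq_emod_of_pos (by norm_num)]
      simp only [beq_iff_eq]
      by_cases h1 : b % 3 = 1
      · rw [if_pos h1] at hmod
        rw [if_neg (by omega)]
        rw [show (b - l) - ((b + 1) / 3 - (l + 1) / 3)
              = (b + 1 - l) - ((b + 1 + 1) / 3 - (l + 1) / 3) from by omega]
      · rw [if_neg h1] at hmod
        rw [if_pos (by omega)]
        rw [show (b - l) - ((b + 1) / 3 - (l + 1) / 3) + 1
              = (b + 1 - l) - ((b + 1 + 1) / 3 - (l + 1) / 3) from by omega]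

-- ===== VERDICT (by name: the statement is the Claim_ definition above) =====
theorem array_num_spec : Claim_equal_array_num := by
  intro l r _ hpre
  unfold Spec_array_num array_num array_num_alt
  by_cases hrl : r < l
  · rw [if_pos hrl]
    have hnil : PySem.List.pyRange l (r + 1) 1 = [] :=
      PySem.List.pyRange_one_eq_nil (by omega)
    rw [hnil]
    simp
  · have hl : 0 ≤ l := hpre.resolve_right hrl
    rw [if_neg hrl]
    have hlr : l ≤ r + 1 := by omega
    have hinv := loop_inv l hl (r + 1) hlr
    change ((PySem.List.pyRange l (r + 1) 1).foldl stepA (0, TA l)).1 = _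
    rw [hinv]
    rw [PySem.Int.floordiv_eq_ediv_of_pos (by norm_num),
        PySem.Int.floordiv_eq_ediv_of_pos (by norm_num)]
    omega
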